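-- pv_equiv track=rewrite | github.com/aaaaaxiedahua/HoGRN_xhuan | model/path_mining.py | build_path_index
-- ===== SOURCE A (Python) =====
-- from collections import defaultdict
--
-- def build_path_index(frequent_paths):
--     """
--     Build index: first_relation -> list of paths starting with it.
--
--     Args:
--         frequent_paths: Dict of frequent paths
--
--     Returns:
--         rel_to_paths: Dict[rel] -> [(path, count), ...]
--     """
--     rel_to_paths = defaultdict(list)
--
--     for path, count in frequent_paths.items():
--         first_rel = path[0]
--         rel_to_paths[first_rel].append((path, count))
--
--     # Sort by frequency (descending)
--     for rel in rel_to_paths: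
--         rel_to_paths[rel].sort(key=lambda x: -x[1])
--
--     return dict(rel_to_paths)
-- ===== SOURCE B (Python) =====
-- from collections import defaultdict
--
-- def build_path_index(frequent_paths):
--     """Sort all items once by descending count (stable), then group in one pass."""
--     buckets = defaultdict(list)
--     for path, count in sorted(frequent_paths.items(), key=lambda x: -x[1]):
--         buckets[path[0]].append((path, count))
--     # key the result in the original dict's key order
--     return {path[0]: buckets[path[0]] for path in frequent_paths}
-- ===== Notes on version B (the rewrite author's own statement) =====
-- stated objective: alternative
-- what changed: A groups paths by first relation and then sorts each bucket separately; B stable-sorts the whole items list once by descending count and groups it in a single pass, re-keying the result in the original key order.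
import Mathlib
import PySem

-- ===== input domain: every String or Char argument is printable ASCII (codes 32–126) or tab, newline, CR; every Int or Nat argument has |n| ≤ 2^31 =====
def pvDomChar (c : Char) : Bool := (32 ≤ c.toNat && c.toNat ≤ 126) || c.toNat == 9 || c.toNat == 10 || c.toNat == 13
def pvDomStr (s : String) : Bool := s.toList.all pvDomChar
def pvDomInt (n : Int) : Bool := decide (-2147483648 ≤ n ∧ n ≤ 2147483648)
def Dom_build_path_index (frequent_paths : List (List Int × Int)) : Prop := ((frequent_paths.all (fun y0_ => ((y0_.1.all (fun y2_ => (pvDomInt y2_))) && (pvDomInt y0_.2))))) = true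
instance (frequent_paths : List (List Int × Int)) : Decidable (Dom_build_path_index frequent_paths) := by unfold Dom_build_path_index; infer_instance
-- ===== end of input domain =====

-- B sorts the whole items list once by descending count (stable) and then groups in a single
-- pass, instead of A's group-first-then-sort-each-bucket; same asymptotic cost, alternative structure.


-- ===== PORT A =====
-- rel_to_paths = defaultdict(list); for path, count: rel_to_paths[path[0]].append((path, count));
-- then for rel in rel_to_paths: rel_to_paths[rel].sort(key=lambda x: -x[1]); return dict(rel_to_paths).
-- path[0] is (PySem.List.pyGet? path 0); Pre_ excludes the empty path, where Python raises IndexError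
-- (the .getD 0 is never reached on Pre_).
def build_path_index (frequent_paths : List (List Int × Int)) : List (Int × List (List Int × Int)) :=
  let d := frequent_paths.foldl
    (fun d pc => d.modify ((PySem.List.pyGet? pc.1 0).getD 0) [] (fun l => l ++ [pc]))
    PySem.Dict.empty
  let d2 := d.keys.foldl
    (fun e r => e.insert r (PySem.List.sorted (e.getD r []) (fun x => -x.2))) d
  d2.items

-- ===== PORT B =====
-- srt = sorted(frequent_paths.items(), key=lambda x: -x[1]) (stable); one grouping pass over srt;
-- finally {path[0]: buckets[path[0]] for path in frequent_paths} re-keys in the original key order.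
def build_path_index_alt (frequent_paths : List (List Int × Int)) : List (Int × List (List Int × Int)) :=
  let srt := PySem.List.sorted frequent_paths (fun x => -x.2)
  let buckets := srt.foldl
    (fun d pc => d.modify ((PySem.List.pyGet? pc.1 0).getD 0) [] (fun l => l ++ [pc]))
    PySem.Dict.empty
  (frequent_paths.foldl
    (fun d pc => d.insert ((PySem.List.pyGet? pc.1 0).getD 0)
      (buckets.getD ((PySem.List.pyGet? pc.1 0).getD 0) []))
    PySem.Dict.empty).items

-- ===== PRECONDITION & SPEC =====
-- Pre_ excludes an empty path, on which Python A raises IndexError at path[0].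
def Pre_build_path_index (frequent_paths : List (List Int × Int)) : Prop :=
  ∀ pc ∈ frequent_paths, pc.1 ≠ []
instance (frequent_paths : List (List Int × Int)) : Decidable (Pre_build_path_index frequent_paths) := by unfold Pre_build_path_index; infer_instance
def pvWitness_build_path_index : (List (List Int × Int)) := [([1, 2], 3), ([1], 1), ([2], 2)]
def Spec_build_path_index (frequent_paths : List (List Int × Int)) (out : List (Int × List (List Int × Int))) : Prop := out = build_path_index_alt frequent_paths
instance (frequent_paths : List (List Int × Int)) (out : List (Int × List (List Int × Int))) : Decidable (Spec_build_path_index frequent_paths out) := by unfold Spec_build_path_index; infer_instance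

-- ===== CLAIM (what is proved, stated in full; the proofs are below) =====
def Claim_equal_build_path_index : Prop := ∀ (frequent_paths : List (List Int × Int)), Dom_build_path_index frequent_paths → Pre_build_path_index frequent_paths → Spec_build_path_index frequent_paths (build_path_index frequent_paths)

-- ===== LEMMAS AND PROOFS =====

-- the key function both ports group by (path[0], with 0 for the empty path excluded by Pre_)
def pvKey (pc : List Int × Int) : Int := (PySem.List.pyGet? pc.1 0).getD 0

-- grouping loop: the bucket at c collects, in order, the elements whose key is c
theorem pv_getD_group (l : List (List Int × Int)) (d : PySem.Dict Int (List (List Int × Int)))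
    (c : Int) :
    (l.foldl (fun d pc => d.modify (pvKey pc) [] (fun l => l ++ [pc])) d).getD c []
      = d.getD c [] ++ l.filter (fun pc => pvKey pc == c) := by
  induction l generalizing d with
  | nil => simp
  | cons x l ih =>
    simp only [List.foldl_cons, ih, List.filter_cons]
    by_cases hc : c = pvKey x
    · subst hc
      rw [PySem.Dict.getD_modify_self]
      simp only [beq_self_eq_true, if_true, List.append_assoc, List.singleton_append]
    · have h : ¬ (pvKey x == c) = true := fun hh => hc ((eq_of_beq hh).symm)
      rw [PySem.Dict.getD_modify_of_ne _ _ _ hc]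
      simp [h]

-- A's second loop: each existing bucket gets sorted in place, everything else is untouched
theorem pv_getD_sortLoop (ks : List Int) (e : PySem.Dict Int (List (List Int × Int)))
    (hnd : ks.Nodup) (c : Int) :
    (ks.foldl (fun e r => e.insert r (PySem.List.sorted (e.getD r []) (fun x => -x.2))) e).getD c []
      = if c ∈ ks then PySem.List.sorted (e.getD c []) (fun x => -x.2) else e.getD c [] := by
  induction ks generalizing e with
  | nil => simp
  | cons r ks ih =>
    have hr : r ∉ ks := (List.nodup_cons.mp hnd).1
    have hnd' : ks.Nodup := (List.nodup_cons.mp hnd).2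
    simp only [List.foldl_cons, ih _ hnd']
    by_cases hc : c ∈ ks
    · have hcr : c ≠ r := fun hh => hr (hh ▸ hc)
      simp [hc, hcr, PySem.Dict.getD_insert, List.mem_cons]
    · by_cases hcr : c = r
      · subst hcr
        simp [hc]
      · simp [hc, hcr, PySem.Dict.getD_insert, List.mem_cons]

-- A's second loop keeps the key list (it only overwrites existing keys)
theorem pv_keys_sortLoop (ks : List Int) (e : PySem.Dict Int (List (List Int × Int)))
    (hsub : ∀ r ∈ ks, r ∈ e.keys) :
    (ks.foldl (fun e r => e.insert r (PySem.List.sorted (e.getD r []) (fun x => -x.2))) e).keys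
      = e.keys := by
  induction ks generalizing e with
  | nil => rfl
  | cons r ks ih =>
    have h1 : e.contains r = true :=
      (PySem.Dict.contains_iff_mem_keys _ _).mpr (hsub r (List.mem_cons_self))
    have hk : (e.insert r (PySem.List.sorted (e.getD r []) (fun x => -x.2))).keys = e.keys :=
      PySem.Dict.keys_insert_of_contains e _ h1
    simp only [List.foldl_cons]
    rw [ih _ (fun s hs => by rw [hk]; exact hsub s (List.mem_cons_of_mem _ hs)), hk]

-- B's final loop: a fold of inserts whose value depends only on the key
theorem pv_getD_rekey (l : List (List Int × Int)) (V : Int → List (List Int × Int))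
    (d : PySem.Dict Int (List (List Int × Int))) (c : Int) :
    (l.foldl (fun d pc => d.insert (pvKey pc) (V (pvKey pc))) d).getD c []
      = if c ∈ l.map pvKey then V c else d.getD c [] := by
  induction l generalizing d with
  | nil => simp
  | cons x l ih =>
    simp only [List.foldl_cons, ih, List.map_cons, List.mem_cons]
    by_cases hc : c ∈ l.map pvKey
    · simp [hc]
    · by_cases hcx : c = pvKey x
      · simp [hcx]
      · simp [hc, hcx, PySem.Dict.getD_insert]

-- inserting before a list every element of which compares after x just conses x
theorem pv_insertBy_cons (b : (List Int × Int) → (List Int × Int) → Bool) (x : List Int × Int)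
    (l : List (List Int × Int)) (h : ∀ y ∈ l, b x y = true) :
    PySem.List.insertBy b x l = x :: l := by
  cases l with
  | nil => rfl
  | cons y ys => simp [PySem.List.insertBy, h y List.mem_cons_self]

-- stability: filtering commutes with a single stable insertion into a key-sorted list
theorem pv_filter_insertBy (p : (List Int × Int) → Bool) (x : List Int × Int)
    (l : List (List Int × Int)) (hl : l.Pairwise (fun a b => (-a.2 : Int) ≤ -b.2)) :
    (PySem.List.insertBy (fun a c => decide ((-a.2 : Int) < -c.2)) x l).filter p
      = if p x then PySem.List.insertBy (fun a c => decide ((-a.2 : Int) < -c.2)) x (l.filter p)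
        else l.filter p := by
  induction l with
  | nil =>
    by_cases hx : p x <;> simp [PySem.List.insertBy, hx]
  | cons y ys ih =>
    have hy : ∀ z ∈ ys, (-y.2 : Int) ≤ -z.2 := (List.pairwise_cons.mp hl).1
    have htl := (List.pairwise_cons.mp hl).2
    by_cases hlt : ((-x.2 : Int) < -y.2)
    · have hall : ∀ z ∈ y :: ys, (decide ((-x.2 : Int) < -z.2)) = true := by
        intro z hz
        rcases List.mem_cons.mp hz with h | h
        · simp [h, hlt]
        · simp [lt_of_lt_of_le hlt (hy z h)]
      have h1 : PySem.List.insertBy (fun a c => decide ((-a.2 : Int) < -c.2)) x (y :: ys)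
          = x :: y :: ys := pv_insertBy_cons _ _ _ hall
      have h2 : PySem.List.insertBy (fun a c => decide ((-a.2 : Int) < -c.2)) x
          ((y :: ys).filter p) = x :: (y :: ys).filter p :=
        pv_insertBy_cons _ _ _ (fun z hz => hall z (List.mem_of_mem_filter hz))
      by_cases hx : p x
      · rw [h1, h2, if_pos hx, List.filter_cons, if_pos hx]
      · rw [h1, if_neg hx, List.filter_cons, if_neg hx]
    · have h1 : PySem.List.insertBy (fun a c => decide ((-a.2 : Int) < -c.2)) x (y :: ys)
          = y :: PySem.List.insertBy (fun a c => decide ((-a.2 : Int) < -c.2)) x ys := by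
        simp [PySem.List.insertBy, hlt]
      have h3 : PySem.List.insertBy (fun a c => decide ((-a.2 : Int) < -c.2)) x
          (y :: ys.filter p)
          = y :: PySem.List.insertBy (fun a c => decide ((-a.2 : Int) < -c.2)) x
              (ys.filter p) := by
        simp [PySem.List.insertBy, hlt]
      rw [h1, List.filter_cons, List.filter_cons, ih htl]
      by_cases hpy : p y
      · by_cases hx : p x
        · simp only [if_pos hpy, if_pos hx, h3]
        · simp only [if_pos hpy, if_neg hx]
      · by_cases hx : p x
        · simp only [if_neg hpy, if_pos hx]
        · simp only [if_neg hpy, if_neg hx]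

-- appending one element to the input inserts it stably into the sorted output
theorem pv_sorted_append_singleton (l : List (List Int × Int)) (x : List Int × Int) :
    PySem.List.sorted (l ++ [x]) (fun x => (-x.2 : Int))
      = PySem.List.insertBy (fun a c => decide ((-a.2 : Int) < -c.2)) x
          (PySem.List.sorted l (fun x => (-x.2 : Int))) := by
  rw [PySem.List.sorted_eq_foldl_insertBy, PySem.List.sorted_eq_foldl_insertBy,
    List.foldl_append]
  rfl

-- stability of Python's sort: filtering commutes with sorting
theorem pv_filter_sorted (p : (List Int × Int) → Bool) (xs : List (List Int × Int)) :
    (PySem.List.sorted xs (fun x => (-x.2 : Int))).filter p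
      = PySem.List.sorted (xs.filter p) (fun x => (-x.2 : Int)) := by
  induction xs using List.reverseRecOn with
  | nil => rfl
  | append_singleton ys x ih =>
    rw [pv_sorted_append_singleton,
      pv_filter_insertBy p x _ (PySem.List.sorted_pairwise ys (fun x => (-x.2 : Int))), ih]
    by_cases hx : p x
    · rw [if_pos hx]
      have hfx : (ys ++ [x]).filter p = ys.filter p ++ [x] := by simp [hx]
      rw [hfx, pv_sorted_append_singleton]
    · rw [if_neg hx]
      have hfx : (ys ++ [x]).filter p = ys.filter p := by simp [hx]
      rw [hfx]

-- ===== VERDICT (by name: the statement is the Claim_ definition above) =====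
theorem build_path_index_spec : Claim_equal_build_path_index := by
  intro fp _ _
  unfold Spec_build_path_index build_path_index build_path_index_alt
  simp only [show ∀ pc : List Int × Int, (PySem.List.pyGet? pc.1 0).getD 0 = pvKey pc
    from fun _ => rfl]
  -- name the shared pieces
  set d := fp.foldl
    (fun d pc => d.modify (pvKey pc) [] (fun l => l ++ [pc]))
    PySem.Dict.empty with hd
  set srt := PySem.List.sorted fp (fun x => (-x.2 : Int)) with hsrt
  set buckets := srt.foldl
    (fun d pc => d.modify (pvKey pc) [] (fun l => l ++ [pc]))
    PySem.Dict.empty with hbuckets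
  -- key lists of the two result dicts agree
  have hdkeys : d.keys = PySem.Set.update (PySem.Dict.empty :
      PySem.Dict Int (List (List Int × Int))).keys (fp.map pvKey) :=
    PySem.Dict.keys_foldl_modify_key fp pvKey [] (fun _ pc l => l ++ [pc]) _
  have hdnodup : d.keys.Nodup := by
    exact PySem.Dict.nodup_keys_foldl_modify_key fp pvKey [] (fun _ pc l => l ++ [pc]) _
      (PySem.Dict.nodup_keys_empty)
  have hd2keys : (d.keys.foldl
      (fun e r => e.insert r (PySem.List.sorted (e.getD r []) (fun x => -x.2))) d).keys
      = d.keys := pv_keys_sortLoop d.keys d (fun r hr => hr)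
  have hgkeys : (fp.foldl (fun d pc => d.insert (pvKey pc) (buckets.getD (pvKey pc) []))
      (PySem.Dict.empty : PySem.Dict Int (List (List Int × Int)))).keys
      = PySem.Set.update (PySem.Dict.empty :
        PySem.Dict Int (List (List Int × Int))).keys (fp.map pvKey) :=
    PySem.Dict.keys_foldl_insert_key fp pvKey (fun _ pc => buckets.getD (pvKey pc) []) _
  have hgnodup : (fp.foldl (fun d pc => d.insert (pvKey pc) (buckets.getD (pvKey pc) []))
      (PySem.Dict.empty : PySem.Dict Int (List (List Int × Int)))).keys.Nodup :=
    PySem.Dict.nodup_keys_foldl_insert_key fp pvKey (fun _ pc => buckets.getD (pvKey pc) []) _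
      (PySem.Dict.nodup_keys_empty)
  have hd2nodup : (d.keys.foldl
      (fun e r => e.insert r (PySem.List.sorted (e.getD r []) (fun x => -x.2))) d).keys.Nodup := by
    rw [hd2keys]; exact hdnodup
  rw [PySem.Dict.items_eq_map_keys _ hd2nodup [],
    PySem.Dict.items_eq_map_keys _ hgnodup []]
  rw [hd2keys, hgkeys, ← hdkeys]
  apply List.map_congr_left
  intro r hrk
  -- A's value at r
  rw [pv_getD_sortLoop d.keys d hdnodup r, if_pos hrk]
  have hA : d.getD r [] = fp.filter (fun pc => pvKey pc == r) := by
    rw [hd, pv_getD_group fp PySem.Dict.empty r]; simp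
  -- B's value at r
  rw [pv_getD_rekey fp (fun c => buckets.getD c []) PySem.Dict.empty r]
  have hrmem : r ∈ fp.map pvKey := by
    have h1 := hrk
    rw [hdkeys] at h1
    exact (PySem.Set.mem_ofList _ _).mp h1
  rw [if_pos hrmem]
  have hB : buckets.getD r [] = srt.filter (fun pc => pvKey pc == r) := by
    rw [hbuckets, pv_getD_group srt PySem.Dict.empty r]; simp
  rw [hA, hB, hsrt, pv_filter_sorted]
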